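-- pv_equiv track=rewrite | github.com/giovanebarcelos/ai-sandbox | class02/GO0214-ConstraintSatisfactionProblemsCSP.py | restricao_sala_horario
-- ===== SOURCE A (Python) =====
-- from typing import List, Dict, Set, Tuple, Optional, Callable
-- from itertools import combinations
--
-- exames = ["RaioX", "Sangue", "Ultrassom", "Ressonancia", "ECG"]
--
-- def restricao_sala_horario(atrib: Dict) -> bool:
--     """Sala só pode ter 1 exame por horário"""
--     for e1, e2 in combinations(exames, 2):
--         if f"{e1}_sala" in atrib and f"{e2}_sala" in atrib:
--             if f"{e1}_horario" in atrib and f"{e2}_horario" in atrib: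
--                 if (atrib[f"{e1}_sala"] == atrib[f"{e2}_sala"] and
--                     atrib[f"{e1}_horario"] == atrib[f"{e2}_horario"]):
--                     return False
--     return True
-- ===== SOURCE B (Python) =====
-- exames = ["RaioX", "Sangue", "Ultrassom", "Ressonancia", "ECG"]
--
-- def restricao_sala_horario(atrib):
--     """Sala só pode ter 1 exame por horário"""
--     seen = set()
--     for e in exames:
--         ks, kh = f"{e}_sala", f"{e}_horario"
--         if ks in atrib and kh in atrib:
--             pair = (atrib[ks], atrib[kh])
--             if pair in seen:
--                 return False
--             seen.add(pair)
--     return True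
-- ===== Notes on version B (the rewrite author's own statement) =====
-- stated objective: simpler
-- what changed: Replaces the nested pairwise scan over all 10 exam combinations with a single linear pass over the 5 exams that records each fully-assigned exam's (room, timeslot) pair in a seen-set and fails on the first collision.
import Mathlib
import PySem

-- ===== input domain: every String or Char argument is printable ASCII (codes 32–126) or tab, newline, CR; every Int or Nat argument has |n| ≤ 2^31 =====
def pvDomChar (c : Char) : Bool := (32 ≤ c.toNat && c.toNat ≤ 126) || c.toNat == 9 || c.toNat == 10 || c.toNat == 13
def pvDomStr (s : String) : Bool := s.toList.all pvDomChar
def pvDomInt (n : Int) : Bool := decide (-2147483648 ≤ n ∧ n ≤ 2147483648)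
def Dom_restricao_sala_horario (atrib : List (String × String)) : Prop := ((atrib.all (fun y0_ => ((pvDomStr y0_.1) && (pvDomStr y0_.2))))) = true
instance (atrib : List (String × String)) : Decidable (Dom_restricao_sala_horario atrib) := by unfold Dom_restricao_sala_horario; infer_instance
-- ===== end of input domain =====

-- B replaces A's nested scan over all 10 exam pairs by one linear pass with a seen-set of
-- (room, timeslot) pairs (objective: simpler).

-- ===== PORT A =====
def pvExames : List String := ["RaioX", "Sangue", "Ultrassom", "Ressonancia", "ECG"]

-- itertools.combinations(xs, 2), ported by hand (exact: ordered pairs i < j in list order)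
def pvCombos2 {α : Type} : List α → List (α × α)
  | [] => []
  | x :: xs => (xs.map (fun y => (x, y))) ++ pvCombos2 xs

-- the 'for e1, e2 in combinations(...)' loop with its early 'return False'
def pvLoopA (d : PySem.Dict String String) : List (String × String) → Bool
  | [] => true
  | (e1, e2) :: rest =>
    if d.contains (e1 ++ "_sala") && d.contains (e2 ++ "_sala") then
      if d.contains (e1 ++ "_horario") && d.contains (e2 ++ "_horario") then
        -- atrib[k] is guarded by the membership tests above, so getD never takes its default
        if (d.getD (e1 ++ "_sala") "" == d.getD (e2 ++ "_sala") "") &&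
           (d.getD (e1 ++ "_horario") "" == d.getD (e2 ++ "_horario") "") then
          false
        else pvLoopA d rest
      else pvLoopA d rest
    else pvLoopA d rest

def restricao_sala_horario (atrib : List (String × String)) : Bool :=
  pvLoopA (PySem.Dict.mk atrib) (pvCombos2 pvExames)

-- ===== PORT B =====
-- the 'for e in exames' loop with the seen-set and its early 'return False'
def pvLoopB (d : PySem.Dict String String) (seen : PySem.Set (String × String)) :
    List String → Bool
  | [] => true
  | e :: rest =>
    if d.contains (e ++ "_sala") && d.contains (e ++ "_horario") then
      let p := (d.getD (e ++ "_sala") "", d.getD (e ++ "_horario") "")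
      if PySem.Set.contains seen p then false
      else pvLoopB d (PySem.Set.add seen p) rest
    else pvLoopB d seen rest

def restricao_sala_horario_alt (atrib : List (String × String)) : Bool :=
  pvLoopB (PySem.Dict.mk atrib) PySem.Set.empty pvExames

-- ===== PRECONDITION & SPEC =====
def Spec_restricao_sala_horario (atrib : List (String × String)) (out : Bool) : Prop := out = restricao_sala_horario_alt atrib
instance (atrib : List (String × String)) (out : Bool) : Decidable (Spec_restricao_sala_horario atrib out) := by unfold Spec_restricao_sala_horario; infer_instance

-- ===== CLAIM (what is proved, stated in full; the proofs are below) =====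
def Claim_equal_restricao_sala_horario : Prop := ∀ (atrib : List (String × String)), Dom_restricao_sala_horario atrib → Spec_restricao_sala_horario atrib (restricao_sala_horario atrib)

-- ===== LEMMAS AND PROOFS =====

-- the (room, timeslot) pair of exam e, when both its keys are assigned
def pvPair (d : PySem.Dict String String) (e : String) : Option (String × String) :=
  if d.contains (e ++ "_sala") && d.contains (e ++ "_horario") then
    some (d.getD (e ++ "_sala") "", d.getD (e ++ "_horario") "")
  else none

-- one step of A's loop, expressed through pvPair
theorem pvLoopA_cons (d : PySem.Dict String String) (e1 e2 : String)
    (rest : List (String × String)) :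
    pvLoopA d ((e1, e2) :: rest) =
      (!((pvPair d e1).isSome && (pvPair d e1 == pvPair d e2)) && pvLoopA d rest) := by
  simp only [pvLoopA, pvPair]
  by_cases h1s : d.contains (e1 ++ "_sala") = true <;>
  by_cases h2s : d.contains (e2 ++ "_sala") = true <;>
  by_cases h1h : d.contains (e1 ++ "_horario") = true <;>
  by_cases h2h : d.contains (e2 ++ "_horario") = true <;>
    simp [h1s, h2s, h1h, h2h, beq_iff_eq] <;>
    by_cases hs : d.getD (e1 ++ "_sala") "" = d.getD (e2 ++ "_sala") "" <;>
    by_cases hh : d.getD (e1 ++ "_horario") "" = d.getD (e2 ++ "_horario") "" <;>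
    simp [hs, hh]

theorem pvLoopA_append (d : PySem.Dict String String) (xs ys : List (String × String)) :
    pvLoopA d (xs ++ ys) = (pvLoopA d xs && pvLoopA d ys) := by
  induction xs with
  | nil => simp [pvLoopA]
  | cons pr rest ih =>
    obtain ⟨e1, e2⟩ := pr
    rw [List.cons_append, pvLoopA_cons, pvLoopA_cons, ih, Bool.and_assoc]

theorem pvLoopA_map (d : PySem.Dict String String) (x : String) (ys : List String) :
    pvLoopA d (ys.map (fun y => (x, y))) =
      ys.all (fun y => !((pvPair d x).isSome && (pvPair d x == pvPair d y))) := by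
  induction ys with
  | nil => simp [pvLoopA]
  | cons y rest ih => simp [pvLoopA_cons, ih]

theorem pvBad_iff (o p : Option (String × String)) :
    (!(o.isSome && o == p)) = true ↔ ¬(o.isSome = true ∧ o = p) := by
  cases o <;> cases p <;> simp

-- A = true  iff  no two exams (in order) have equal assigned pairs
theorem pvLoopA_combos (d : PySem.Dict String String) (l : List String) :
    pvLoopA d (pvCombos2 l) = true ↔
      l.Pairwise (fun a b => ¬((pvPair d a).isSome = true ∧ pvPair d a = pvPair d b)) := by
  induction l with
  | nil => simp [pvCombos2, pvLoopA]
  | cons x xs ih =>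
    rw [pvCombos2, pvLoopA_append, Bool.and_eq_true, pvLoopA_map, ih, List.pairwise_cons,
      List.all_eq_true, and_congr_left_iff]
    intro _
    exact forall₂_congr fun y _ => pvBad_iff (pvPair d x) (pvPair d y)

-- B = true  iff  the assigned pairs are pairwise distinct and avoid seen
theorem pvLoopB_iff (d : PySem.Dict String String) (l : List String) :
    ∀ seen : PySem.Set (String × String),
      pvLoopB d seen l = true ↔
        (l.filterMap (pvPair d)).Pairwise (· ≠ ·) ∧
          ∀ v ∈ l.filterMap (pvPair d), v ∉ seen := by
  induction l with
  | nil => intro seen; simp [pvLoopB]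
  | cons e rest ih =>
    intro seen
    cases hg : (d.contains (e ++ "_sala") && d.contains (e ++ "_horario")) with
    | false =>
      have hpe : pvPair d e = none := by simp [pvPair, hg]
      simp only [pvLoopB, hg, Bool.false_eq_true, if_false, List.filterMap_cons, hpe]
      exact ih seen
    | true =>
      have hpe : pvPair d e = some (d.getD (e ++ "_sala") "", d.getD (e ++ "_horario") "") := by
        simp [pvPair, hg]
      simp only [pvLoopB, hg, if_true, List.filterMap_cons, hpe]
      set v := (d.getD (e ++ "_sala") "", d.getD (e ++ "_horario") "") with hv
      by_cases hseen : v ∈ seen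
      · simp only [List.pairwise_cons, List.mem_cons]
        constructor
        · intro h
          exact absurd h (by simp [PySem.Set.contains, hseen])
        · rintro ⟨-, hmem⟩
          exact absurd hseen (hmem v (Or.inl rfl))
      · rw [if_neg (by simp [PySem.Set.contains, hseen]), ih, List.pairwise_cons]
        constructor
        · rintro ⟨hpw, hmem⟩
          refine ⟨⟨fun w hw h => (hmem w hw) (h ▸ (PySem.Set.mem_add seen v v).mpr (Or.inr rfl)),
            hpw⟩, ?_⟩
          intro w hw
          rcases List.mem_cons.mp hw with hw1 | hw1
          · exact hw1 ▸ hseen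
          · exact fun hc => (hmem w hw1) ((PySem.Set.mem_add seen v w).mpr (Or.inl hc))
        · rintro ⟨⟨hhead, hpw⟩, hmem⟩
          refine ⟨hpw, fun w hw hc => ?_⟩
          rcases (PySem.Set.mem_add seen v w).mp hc with hc | hc
          · exact hmem w (List.mem_cons_of_mem _ hw) hc
          · exact hhead w hw hc.symm

-- the two characterisations coincide
theorem pvPairwise_iff_filterMap (d : PySem.Dict String String) (l : List String) :
    l.Pairwise (fun a b => ¬((pvPair d a).isSome = true ∧ pvPair d a = pvPair d b)) ↔
      (l.filterMap (pvPair d)).Pairwise (· ≠ ·) := by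
  induction l with
  | nil => simp
  | cons e rest ih =>
    rw [List.pairwise_cons, List.filterMap_cons]
    rcases hpe : pvPair d e with _ | v
    · simp only [Option.isSome_none, Bool.false_eq_true, false_and, not_false_eq_true,
        implies_true, true_and]
      exact ih
    · rw [List.pairwise_cons]
      refine and_congr ?_ ih
      constructor
      · intro h w hw heq
        obtain ⟨y, hy, hpy⟩ := List.mem_filterMap.mp hw
        exact h y hy ⟨rfl, by rw [hpy]; exact congrArg some heq⟩
      · rintro h y hy ⟨-, he⟩
        exact (h v (List.mem_filterMap.mpr ⟨y, hy, he.symm⟩)) rfl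

-- ===== VERDICT (by name: the statement is the Claim_ definition above) =====
theorem restricao_sala_horario_spec : Claim_equal_restricao_sala_horario := by
  intro atrib _
  unfold Spec_restricao_sala_horario restricao_sala_horario restricao_sala_horario_alt
  set d := PySem.Dict.mk atrib
  have ha := pvLoopA_combos d pvExames
  have hb := pvLoopB_iff d pvExames PySem.Set.empty
  have hiff : pvLoopA d (pvCombos2 pvExames) = true ↔ pvLoopB d PySem.Set.empty pvExames = true := by
    rw [ha, hb, pvPairwise_iff_filterMap]
    simp [PySem.Set.empty]
  exact Bool.coe_iff_coe.mp hiff
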